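-- pv_equiv track=rewrite | github.com/AbhishekRana21/LeetCode | May2023/find-the-difference-of-two-arrays.py | findDifference
-- ===== SOURCE A (Python) =====
-- def findDifference(nums1, nums2):
--     res = []
--     l1 = []
--     l2 = []
--     for x in nums1:
--         if (x not in nums2 and x not in l1):
--             l1.append(x)
--     for x in nums2:
--         if (x not in nums1 and x not in l2):
--             l2.append(x)
--     res.append(l1)
--     res.append(l2)
--     return res
-- ===== SOURCE B (Python) =====
-- def findDifference(nums1, nums2):
--     # One combined pass: tag every value with a bitmask of which arrays it occurs in,
--     # then partition the ordered tag table by mask.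
--     mask = {}
--     for x in nums1:
--         mask[x] = mask.get(x, 0) | 1
--     for x in nums2:
--         mask[x] = mask.get(x, 0) | 2
--     return [[x for x, m in mask.items() if m == 1],
--             [x for x, m in mask.items() if m == 2]]
-- ===== Notes on version B (the rewrite author's own statement) =====
-- stated objective: faster
-- what changed: Instead of A's two quadratic filter-and-dedup scans (membership in the other list and in the growing result), B makes one tagging pass building a single insertion-ordered dict from value to a bitmask of which arrays contain it, then partitions the dict items by mask == 1 / mask == 2; no cross-membership filtering or dedup pass exists in B.
import Mathlib
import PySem

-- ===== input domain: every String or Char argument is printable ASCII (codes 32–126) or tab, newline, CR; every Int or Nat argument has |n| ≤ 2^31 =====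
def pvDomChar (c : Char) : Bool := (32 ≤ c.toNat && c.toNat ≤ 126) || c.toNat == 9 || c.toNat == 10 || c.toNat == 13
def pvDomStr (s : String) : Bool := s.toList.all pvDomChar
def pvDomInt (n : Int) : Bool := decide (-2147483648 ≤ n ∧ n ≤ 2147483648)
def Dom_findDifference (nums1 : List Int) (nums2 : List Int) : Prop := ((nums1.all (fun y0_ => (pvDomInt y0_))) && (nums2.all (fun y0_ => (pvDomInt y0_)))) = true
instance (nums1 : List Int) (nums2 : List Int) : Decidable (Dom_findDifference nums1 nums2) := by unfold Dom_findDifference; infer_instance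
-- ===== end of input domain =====

-- B replaces A's two quadratic filter-and-dedup scans by one bitmask-tagging dict
-- (value -> which arrays contain it) partitioned by tag afterwards (faster).


-- ===== PORT A =====
def findDifference (nums1 : List Int) (nums2 : List Int) : List (List Int) :=
  let l1 := nums1.foldl (fun l1 x => if ¬ x ∈ nums2 ∧ ¬ x ∈ l1 then l1 ++ [x] else l1) []
  let l2 := nums2.foldl (fun l2 x => if ¬ x ∈ nums1 ∧ ¬ x ∈ l2 then l2 ++ [x] else l2) []
  [l1, l2]

-- ===== PORT B =====
def findDifference_alt (nums1 : List Int) (nums2 : List Int) : List (List Int) :=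
  let m1 : PySem.Dict Int Int :=
    nums1.foldl (fun d x => d.insert x (PySem.Int.bor (d.getD x 0) 1)) PySem.Dict.empty
  let m : PySem.Dict Int Int :=
    nums2.foldl (fun d x => d.insert x (PySem.Int.bor (d.getD x 0) 2)) m1
  [ (m.items.filter (fun p => p.2 == 1)).map (fun p => p.1),
    (m.items.filter (fun p => p.2 == 2)).map (fun p => p.1) ]

-- ===== PRECONDITION & SPEC =====
def Spec_findDifference (nums1 : List Int) (nums2 : List Int) (out : List (List Int)) : Prop := out = findDifference_alt nums1 nums2
instance (nums1 : List Int) (nums2 : List Int) (out : List (List Int)) : Decidable (Spec_findDifference nums1 nums2 out) := by unfold Spec_findDifference; infer_instance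

-- ===== CLAIM (what is proved, stated in full; the proofs are below) =====
def Claim_equal_findDifference : Prop := ∀ (nums1 : List Int) (nums2 : List Int), Dom_findDifference nums1 nums2 → Spec_findDifference nums1 nums2 (findDifference nums1 nums2)

-- ===== LEMMAS AND PROOFS =====

-- A's scan-and-append loop is ordered dedup (Set.ofList) of the cross-filtered list.
lemma loop_eq_filter_fold (other : List Int) :
    ∀ (xs acc : List Int),
      xs.foldl (fun l x => if ¬ x ∈ other ∧ ¬ x ∈ l then l ++ [x] else l) acc
        = (xs.filter (fun x => !(PySem.Set.contains (PySem.Set.ofList other) x))).foldl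
            PySem.Set.add acc := by
  intro xs
  induction xs with
  | nil => intro acc; rfl
  | cons x xs ih =>
    intro acc
    by_cases hmem : x ∈ other
    · simp [List.foldl_cons, hmem, PySem.Set.mem_ofList, PySem.Set.contains, ih]
    · by_cases hacc : x ∈ acc
      · simp [List.foldl_cons, hmem, hacc, PySem.Set.mem_ofList, PySem.Set.contains,
              PySem.Set.add, ih]
      · simp [List.foldl_cons, hmem, hacc, PySem.Set.mem_ofList, PySem.Set.contains,
              PySem.Set.add, ih]

lemma loop_eq_dedup_filter (other xs : List Int) :
    xs.foldl (fun l x => if ¬ x ∈ other ∧ ¬ x ∈ l then l ++ [x] else l) []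
      = PySem.Set.ofList (xs.filter (fun x => !(PySem.Set.contains (PySem.Set.ofList other) x))) := by
  rw [loop_eq_filter_fold]
  simp only [PySem.Set.ofList_eq_foldl]

-- ofList commutes with filter (first-occurrence dedup keeps relative order).
lemma ofList_filter (p : Int → Bool) (xs : List Int) :
    PySem.Set.ofList (xs.filter p) = (PySem.Set.ofList xs).filter p := by
  induction xs using List.reverseRecOn with
  | nil => rfl
  | append_singleton xs x ih =>
    rw [List.filter_append, PySem.Set.ofList_append_singleton]
    by_cases hp : p x = true
    · rw [List.filter_cons_of_pos hp, List.filter_nil, PySem.Set.ofList_append_singleton, ih]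
      by_cases hmem : x ∈ PySem.Set.ofList xs
      · rw [PySem.Set.add_of_mem hmem, PySem.Set.add_of_mem]
        rw [List.mem_filter]; exact ⟨hmem, hp⟩
      · rw [PySem.Set.add_of_not_mem hmem, PySem.Set.add_of_not_mem, List.filter_append,
            List.filter_cons_of_pos hp, List.filter_nil]
        intro h; exact hmem (List.mem_filter.mp h).1
    · rw [List.filter_cons_of_neg (by simpa using hp), List.filter_nil, List.append_nil, ih]
      by_cases hmem : x ∈ PySem.Set.ofList xs
      · rw [PySem.Set.add_of_mem hmem]
      · rw [PySem.Set.add_of_not_mem hmem, List.filter_append,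
            List.filter_cons_of_neg (by simpa using hp), List.filter_nil, List.append_nil]

-- B's first loop builds the table  value ↦ 1  over the distinct values of nums1.
lemma first_loop_items (xs : List Int) :
    (xs.foldl (fun d x => d.insert x (PySem.Int.bor (d.getD x 0) 1)) PySem.Dict.empty).items
      = (PySem.Set.ofList xs).map (fun k => (k, (1 : Int))) := by
  induction xs using List.reverseRecOn with
  | nil => rfl
  | append_singleton xs x ih =>
    rw [List.foldl_append, List.foldl_cons, List.foldl_nil, PySem.Set.ofList_append_singleton]
    have hkeys : (xs.foldl (fun d x => d.insert x (PySem.Int.bor (d.getD x 0) 1)) PySem.Dict.empty).keys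
        = PySem.Set.ofList xs := by
      simp [PySem.Dict.keys, ih, List.map_map, Function.comp_def]
    by_cases hmem : x ∈ PySem.Set.ofList xs
    · have hitem : (x, (1:Int)) ∈ (xs.foldl (fun d x => d.insert x (PySem.Int.bor (d.getD x 0) 1)) PySem.Dict.empty).items := by
        rw [ih]; exact List.mem_map_of_mem hmem
      have hnd : (xs.foldl (fun d x => d.insert x (PySem.Int.bor (d.getD x 0) 1)) PySem.Dict.empty).keys.Nodup := by
        rw [hkeys]; exact PySem.Set.nodup_ofList xs
      have hc : (xs.foldl (fun d x => d.insert x (PySem.Int.bor (d.getD x 0) 1)) PySem.Dict.empty).contains x = true := by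
        rw [PySem.Dict.contains_iff_mem_keys, hkeys]; exact hmem
      rw [PySem.Dict.getD_of_mem_items _ hitem hnd 0]
      have hbor : PySem.Int.bor (1:Int) 1 = 1 := rfl
      rw [hbor, PySem.Dict.items_insert_of_contains _ _ hc, ih,
          PySem.Set.add_of_mem hmem, List.map_map]
      apply List.map_congr_left
      intro k hk
      by_cases h : k = x <;> simp [h]
    · have hc : (xs.foldl (fun d x => d.insert x (PySem.Int.bor (d.getD x 0) 1)) PySem.Dict.empty).contains x = false := by
        rw [Bool.eq_false_iff]
        intro h
        rw [PySem.Dict.contains_iff_mem_keys, hkeys] at h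
        exact hmem h
      rw [PySem.Dict.getD_of_not_contains _ 0 hc]
      have hbor : PySem.Int.bor (0:Int) 1 = 1 := rfl
      rw [hbor, PySem.Dict.items_insert_of_not_contains _ _ hc, ih,
          PySem.Set.add_of_not_mem hmem, List.map_append]
      rfl

-- B's second loop upgrades shared values to 3 and appends fresh nums2-only values tagged 2.
lemma second_loop_items (nums1 : List Int) (ys : List Int) :
    ((ys.foldl (fun d x => d.insert x (PySem.Int.bor (d.getD x 0) 2))
        (nums1.foldl (fun d x => d.insert x (PySem.Int.bor (d.getD x 0) 1)) PySem.Dict.empty))).items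
      = (PySem.Set.ofList nums1).map (fun k => (k, if k ∈ ys then (3 : Int) else 1))
        ++ (PySem.Set.ofList (ys.filter (fun y => !(PySem.Set.contains (PySem.Set.ofList nums1) y)))).map
             (fun k => (k, (2 : Int))) := by
  induction ys using List.reverseRecOn with
  | nil =>
    rw [List.foldl_nil, first_loop_items, List.filter_nil]
    simp
  | append_singleton ys y ih =>
    set q : Int → Bool := fun y => !(PySem.Set.contains (PySem.Set.ofList nums1) y) with hq
    have hqmem : ∀ z : Int, q z = true ↔ z ∉ PySem.Set.ofList nums1 := by
      intro z
      rw [hq]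
      simp [PySem.Set.contains]
    set T := (ys.foldl (fun d x => d.insert x (PySem.Int.bor (d.getD x 0) 2))
        (nums1.foldl (fun d x => d.insert x (PySem.Int.bor (d.getD x 0) 1)) PySem.Dict.empty)) with hT
    have hkeys : T.keys = PySem.Set.ofList nums1 ++ PySem.Set.ofList (ys.filter q) := by
      simp [PySem.Dict.keys, ih, List.map_map, Function.comp_def]
    have hnd : T.keys.Nodup := by
      rw [hkeys]
      refine List.Nodup.append (PySem.Set.nodup_ofList _) (PySem.Set.nodup_ofList _) ?_
      intro a ha hb
      have : q a = true := (List.mem_filter.mp ((PySem.Set.mem_ofList _ _).mp hb)).2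
      exact (hqmem a).mp this ha
    rw [List.foldl_append, List.foldl_cons, List.foldl_nil, ← hT]
    by_cases h1 : y ∈ PySem.Set.ofList nums1
    · have hitem : (y, if y ∈ ys then (3:Int) else 1) ∈ T.items := by
        rw [ih]; exact List.mem_append_left _ (List.mem_map_of_mem h1)
      have hc : T.contains y = true := by
        rw [PySem.Dict.contains_iff_mem_keys, hkeys]; exact List.mem_append_left _ h1
      rw [PySem.Dict.getD_of_mem_items _ hitem hnd 0]
      have hbor : PySem.Int.bor (if y ∈ ys then (3:Int) else 1) 2 = 3 := by
        by_cases hy : y ∈ ys <;> simp [hy] <;> rfl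
      rw [hbor, PySem.Dict.items_insert_of_contains _ _ hc, ih, List.map_append,
          List.map_map, List.map_map]
      have hfy : (ys ++ [y]).filter q = ys.filter q := by
        rw [List.filter_append, List.filter_cons_of_neg, List.filter_nil, List.append_nil]
        simp [hqmem y, h1]
      rw [hfy]
      congr 1
      · apply List.map_congr_left
        intro k hk
        by_cases hky : k = y
        · subst hky; simp
        · simp only [Function.comp_def]
          have : (k == y) = false := by simp [hky]
          simp [this, hky, List.mem_append]
      · apply List.map_congr_left
        intro k hk
        have hkn : k ∉ PySem.Set.ofList nums1 :=
          (hqmem k).mp (List.mem_filter.mp ((PySem.Set.mem_ofList _ _).mp hk)).2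
        have hkney : k ≠ y := by rintro rfl; exact hkn h1
        have hky : (k == y) = false := by simpa using hkney
        simp [hkney]
    · by_cases h2 : y ∈ ys
      · have hyf : y ∈ PySem.Set.ofList (ys.filter q) := by
          rw [PySem.Set.mem_ofList, List.mem_filter]
          exact ⟨h2, (hqmem y).mpr h1⟩
        have hitem : (y, (2:Int)) ∈ T.items := by
          rw [ih]; exact List.mem_append_right _ (List.mem_map_of_mem hyf)
        have hc : T.contains y = true := by
          rw [PySem.Dict.contains_iff_mem_keys, hkeys]; exact List.mem_append_right _ hyf
        rw [PySem.Dict.getD_of_mem_items _ hitem hnd 0]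
        have hbor : PySem.Int.bor (2:Int) 2 = 2 := rfl
        rw [hbor, PySem.Dict.items_insert_of_contains _ _ hc, ih, List.map_append,
            List.map_map, List.map_map]
        have hfy : PySem.Set.ofList ((ys ++ [y]).filter q) = PySem.Set.ofList (ys.filter q) := by
          rw [List.filter_append, List.filter_cons_of_pos ((hqmem y).mpr h1), List.filter_nil,
              PySem.Set.ofList_append_singleton, PySem.Set.add_of_mem hyf]
        rw [hfy]
        congr 1
        · apply List.map_congr_left
          intro k hk
          have hkney : k ≠ y := by rintro rfl; exact h1 hk
          have hky : (k == y) = false := by simpa using hkney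
          simp [hkney, List.mem_append]
        · apply List.map_congr_left
          intro k hk
          by_cases hky : k = y <;> simp [hky]
      · have hc : T.contains y = false := by
          rw [Bool.eq_false_iff]
          intro h
          rw [PySem.Dict.contains_iff_mem_keys, hkeys, List.mem_append] at h
          rcases h with h | h
          · exact h1 h
          · exact h2 (List.mem_filter.mp ((PySem.Set.mem_ofList _ _).mp h)).1
        rw [PySem.Dict.getD_of_not_contains _ 0 hc]
        have hbor : PySem.Int.bor (0:Int) 2 = 2 := rfl
        have hynf : y ∉ PySem.Set.ofList (ys.filter q) := by
          rw [PySem.Set.mem_ofList, List.mem_filter]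
          rintro ⟨h, -⟩; exact h2 h
        rw [hbor, PySem.Dict.items_insert_of_not_contains _ _ hc, ih,
            List.filter_append, List.filter_cons_of_pos ((hqmem y).mpr h1), List.filter_nil,
            PySem.Set.ofList_append_singleton, PySem.Set.add_of_not_mem hynf, List.map_append,
            List.append_assoc]
        congr 1
        apply List.map_congr_left
        intro k hk
        have hkney : k ≠ y := by rintro rfl; exact h1 hk
        simp [hkney, List.mem_append]

-- ===== VERDICT (by name: the statement is the Claim_ definition above) =====
theorem findDifference_spec : Claim_equal_findDifference := by
  intro nums1 nums2 _
  unfold Spec_findDifference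
  simp only [findDifference, findDifference_alt]
  rw [loop_eq_dedup_filter nums2 nums1, loop_eq_dedup_filter nums1 nums2, second_loop_items]
  rw [List.filter_append, List.filter_append, List.filter_map, List.filter_map,
      List.filter_map, List.filter_map]
  have hF1 : (PySem.Set.ofList nums1).filter
      ((fun p : Int × Int => p.2 == 1) ∘ (fun k => (k, if k ∈ nums2 then (3:Int) else 1)))
      = (PySem.Set.ofList nums1).filter (fun x => !(PySem.Set.contains (PySem.Set.ofList nums2) x)) := by
    apply List.filter_congr
    intro k _
    by_cases hk : k ∈ nums2 <;> simp [hk, PySem.Set.contains, PySem.Set.mem_ofList]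
  have hG1 : (PySem.Set.ofList (nums2.filter (fun y => !(PySem.Set.contains (PySem.Set.ofList nums1) y)))).filter
      ((fun p : Int × Int => p.2 == 1) ∘ (fun k => (k, (2:Int)))) = [] := by
    simp [Function.comp_def]
  have hF2 : (PySem.Set.ofList nums1).filter
      ((fun p : Int × Int => p.2 == 2) ∘ (fun k => (k, if k ∈ nums2 then (3:Int) else 1)))
      = [] := by
    rw [List.filter_eq_nil_iff]
    intro k _
    by_cases hk : k ∈ nums2 <;> simp [hk]
  have hG2 : (PySem.Set.ofList (nums2.filter (fun y => !(PySem.Set.contains (PySem.Set.ofList nums1) y)))).filter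
      ((fun p : Int × Int => p.2 == 2) ∘ (fun k => (k, (2:Int))))
      = PySem.Set.ofList (nums2.filter (fun y => !(PySem.Set.contains (PySem.Set.ofList nums1) y))) := by
    simp [Function.comp_def]
  rw [hF1, hG1, hF2, hG2, ofList_filter]
  simp [List.map_map, Function.comp_def]
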